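-- pv_equiv track=rewrite | github.com/oasis791/Coding-Test | 4주차/1번/4_1_DaekYou.py | solution
-- ===== SOURCE A (Python) =====
-- def solution(s):
--     words = s.split(' ')
--     answer = ''
--
--     for word in words:
--         word = word.lower()
--         chars = list(word)   #Python에서 문자열은 immutable
--         length = len(chars)
--
--         for index in range(length):
--             isEven = (index == 0) or (index % 2 == 0)
--             if isEven:
--                 answer += chars[index].upper()
--             else:
--                  answer += chars[index]
--         answer += ' '
--     return answer[:-1]
-- ===== SOURCE B (Python) =====
-- def solution(s):
--     out = []
--     k = 0
--     for ch in s: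
--         if ch == ' ':
--             out.append(' ')
--             k = 0
--         else:
--             c = ch.lower()
--             out.append(c.upper() if k % 2 == 0 else c)
--             k += 1
--     return ''.join(out)
-- ===== Notes on version B (the rewrite author's own statement) =====
-- stated objective: simpler
-- what changed: Replaces split-into-words plus a nested index loop (and the final trailing-space strip) by a single pass over the raw string with a position counter that resets on spaces, so spaces are copied verbatim and no strip is needed.
import Mathlib
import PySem

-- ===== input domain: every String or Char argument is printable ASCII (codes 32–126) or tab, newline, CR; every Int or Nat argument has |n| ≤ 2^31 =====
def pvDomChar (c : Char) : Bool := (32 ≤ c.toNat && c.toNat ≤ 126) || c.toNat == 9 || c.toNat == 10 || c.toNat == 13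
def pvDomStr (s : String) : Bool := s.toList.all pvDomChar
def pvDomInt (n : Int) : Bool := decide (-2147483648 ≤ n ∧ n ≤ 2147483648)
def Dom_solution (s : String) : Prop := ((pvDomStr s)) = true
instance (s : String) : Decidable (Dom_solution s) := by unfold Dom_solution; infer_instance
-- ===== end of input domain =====

-- B replaces split-into-words + a nested index loop + trailing-space strip by one pass
-- with a position counter that resets on spaces (objective: simpler).

-- ===== PORT A =====
def solution (s : String) : String :=
  let words := PySem.Chars.splitOn s.toList [' ']
  let answer := words.foldl (fun answer word =>
    let word := PySem.Chars.lower word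
    let chars := word
    let length := PySem.List.len chars
    let answer := (PySem.List.pyRange 0 length 1).foldl (fun answer index =>
      let isEven := (index == 0) || (PySem.Int.mod index 2 == 0)
      if isEven then answer ++ [PySem.Chars.upperChar (PySem.List.pyGetD chars index ' ')]
      else answer ++ [PySem.List.pyGetD chars index ' ']) answer
    answer ++ [' ']) ([] : List Char)
  String.ofList (PySem.List.slice answer none (some (-1)))

-- ===== PORT B =====
def solution_alt (s : String) : String :=
  let step := fun (st : List Char × Nat) (c : Char) =>
    if c = ' ' then (st.1 ++ [' '], 0)
    else (st.1 ++ [if st.2 % 2 = 0 then PySem.Chars.upperChar (PySem.Chars.lowerChar c)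
                   else PySem.Chars.lowerChar c], st.2 + 1)
  String.ofList (s.toList.foldl step (([] : List Char), 0)).1

-- ===== PRECONDITION & SPEC =====
def Spec_solution (s : String) (out : String) : Prop := out = solution_alt s
instance (s : String) (out : String) : Decidable (Spec_solution s out) := by unfold Spec_solution; infer_instance

-- ===== CLAIM (what is proved, stated in full; the proofs are below) =====
def Claim_equal_solution : Prop := ∀ (s : String), Dom_solution s → Spec_solution s (solution s)

-- ===== LEMMAS AND PROOFS =====

def mySplit (pre : List Char) : List Char → List (List Char)
  | [] => [pre]
  | c :: t => if c = ' ' then pre :: mySplit [] t else mySplit (pre ++ [c]) t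

lemma splitOn_go_char (l : List Char) : ∀ (fuel : Nat) (cur : List Char)
    (acc : List (List Char)), l.length ≤ fuel →
    PySem.Chars.splitOn.go [' '] fuel l cur acc = acc.reverse ++ mySplit cur.reverse l := by
  induction l with
  | nil =>
    intro fuel cur acc h
    cases fuel <;> simp [PySem.Chars.splitOn.go, mySplit]
  | cons c t ih =>
    intro fuel cur acc h
    cases fuel with
    | zero => simp at h
    | succ f =>
      by_cases hc : c = ' '
      · subst hc
        rw [PySem.Chars.splitOn.go]
        simp [mySplit, ih f [] (cur.reverse :: acc) (by simpa using h)]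
      · rw [PySem.Chars.splitOn.go]
        simp [List.isPrefixOf, hc, Ne.symm hc, mySplit,
          ih f (c :: cur) acc (by simpa using Nat.le_of_succ_le_succ h)]

lemma splitOn_eq_mySplit (l : List Char) :
    PySem.Chars.splitOn l [' '] = mySplit [] l := by
  rw [PySem.Chars.splitOn, splitOn_go_char l (l.length+1) [] [] (by omega)]
  simp
def procN (k : Nat) : List Char → List Char
  | [] => []
  | c :: t => (if k % 2 = 0 then PySem.Chars.upperChar c else c) :: procN (k + 1) t


lemma inner_loop (suf : List Char) : ∀ (pre acc : List Char),
    (PySem.List.pyRange (pre.length : Int) ((pre.length : Int) + (suf.length : Int)) 1).foldl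
      (fun answer index =>
        let isEven := (index == 0) || (PySem.Int.mod index 2 == 0)
        if isEven then answer ++ [PySem.Chars.upperChar (PySem.List.pyGetD (pre ++ suf) index ' ')]
        else answer ++ [PySem.List.pyGetD (pre ++ suf) index ' ']) acc
    = acc ++ procN pre.length suf := by
  induction suf with
  | nil =>
    intro pre acc
    rw [PySem.List.pyRange_one_eq_nil (by simp)]
    simp [procN]
  | cons c t ih =>
    intro pre acc
    rw [PySem.List.pyRange_one_cons (by simp only [List.length_cons]; push_cast; omega)]
    have hget : PySem.List.pyGetD (pre ++ c :: t) (pre.length : Int) ' ' = c := by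
      simp [PySem.List.pyGetD_natCast, List.getD]
    have hmod : PySem.Int.mod (pre.length : Int) 2 = ((pre.length % 2 : Nat) : Int) := by
      exact_mod_cast PySem.Int.mod_natCast pre.length 2
    have harr : pre ++ c :: t = (pre ++ [c]) ++ t := by simp
    rw [List.foldl_cons, harr]
    show List.foldl _ (if ((((pre.length:Int)) == 0) || (PySem.Int.mod (pre.length:Int) 2 == 0)) = true
        then acc ++ [PySem.Chars.upperChar (PySem.List.pyGetD ((pre ++ [c]) ++ t) (pre.length:Int) ' ')]
        else acc ++ [PySem.List.pyGetD ((pre ++ [c]) ++ t) (pre.length:Int) ' ']) _ = _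
    have hget' : PySem.List.pyGetD ((pre ++ [c]) ++ t) (pre.length:Int) ' ' = c := by
      rw [← harr]; exact hget
    have hb1 : ((pre.length:Int) + 1) = (((pre ++ [c]).length : Nat) : Int) := by
      simp
    have hb2 : ((pre.length:Int) + (((c :: t).length : Nat) : Int))
        = (((pre ++ [c]).length : Nat) : Int) + ((t.length : Nat) : Int) := by
      simp; omega
    rw [hget', hb1, hb2, ih (pre ++ [c])]
    by_cases hp : pre.length % 2 = 0
    · have hc : (((pre.length:Int)) == 0 || (PySem.Int.mod (pre.length:Int) 2 == 0)) = true := by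
        rw [hmod]; simp [hp]
      rw [hc]
      simp [procN, hp]
    · have hc : (((pre.length:Int)) == 0 || (PySem.Int.mod (pre.length:Int) 2 == 0)) = false := by
        rw [hmod]; simp [show pre.length ≠ 0 by omega]; omega
      rw [hc]
      simp [procN, hp]

def bspec (k : Nat) : List Char → List Char
  | [] => []
  | c :: t =>
    if c = ' ' then ' ' :: bspec 0 t
    else (if k % 2 = 0 then PySem.Chars.upperChar (PySem.Chars.lowerChar c)
          else PySem.Chars.lowerChar c) :: bspec (k + 1) t

lemma procN_append_singleton (xs : List Char) : ∀ (k : Nat) (y : Char),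
    procN k (xs ++ [y]) = procN k xs ++ [if (k + xs.length) % 2 = 0 then PySem.Chars.upperChar y else y] := by
  induction xs with
  | nil => intro k y; simp [procN]
  | cons x xs ih =>
    intro k y
    simp only [List.cons_append, procN, ih (k+1) y, List.length_cons]
    have : (k + 1 + xs.length) = (k + (xs.length + 1)) := by omega
    rw [this]
    simp

lemma main_lemma (l : List Char) : ∀ (pre : List Char),
    ((mySplit pre l).map (fun w => procN 0 (PySem.Chars.lower w) ++ [' '])).flatten
    = procN 0 (PySem.Chars.lower pre) ++ bspec pre.length l ++ [' '] := by
  induction l with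
  | nil => intro pre; simp [mySplit, bspec]
  | cons c t ih =>
    intro pre
    by_cases hc : c = ' '
    · subst hc
      rw [show mySplit pre (' ' :: t) = pre :: mySplit [] t from by simp [mySplit],
        show bspec pre.length (' ' :: t) = ' ' :: bspec 0 t from by simp [bspec]]
      simp only [List.map_cons, List.flatten_cons, ih []]
      simp [PySem.Chars.lower, procN]
    · have hl : PySem.Chars.lower (pre ++ [c]) = PySem.Chars.lower pre ++ [PySem.Chars.lowerChar c] := by
        simp [PySem.Chars.lower]
      have hlen : (PySem.Chars.lower pre).length = pre.length := by
        simp [PySem.Chars.lower]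
      simp only [mySplit, if_neg hc, ih (pre ++ [c]), hl,
        procN_append_singleton, hlen, Nat.zero_add, List.length_append]
      simp only [bspec, if_neg hc]
      simp
lemma bfold (l : List Char) : ∀ (acc : List Char) (k : Nat),
    (l.foldl (fun (st : List Char × Nat) c =>
      if c = ' ' then (st.1 ++ [' '], 0)
      else (st.1 ++ [if st.2 % 2 = 0 then PySem.Chars.upperChar (PySem.Chars.lowerChar c)
                     else PySem.Chars.lowerChar c], st.2 + 1)) (acc, k)).1
    = acc ++ bspec k l := by
  induction l with
  | nil => intro acc k; simp [bspec]
  | cons c t ih =>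
    intro acc k
    by_cases hc : c = ' '
    · subst hc; simp [bspec, ih]
    · simp only [List.foldl_cons, if_neg hc, ih, bspec]
      simp

lemma inner0 (chars : List Char) (acc : List Char) :
    (PySem.List.pyRange 0 (PySem.List.len chars) 1).foldl (fun answer index =>
      if (index == 0 || PySem.Int.mod index 2 == 0) = true
      then answer ++ [PySem.Chars.upperChar (PySem.List.pyGetD chars index ' ')]
      else answer ++ [PySem.List.pyGetD chars index ' ']) acc
    = acc ++ procN 0 chars := by
  have h := inner_loop chars [] acc
  simpa using h

lemma words_fold (ws : List (List Char)) : ∀ acc : List Char,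
    ws.foldl (fun answer word =>
      ((PySem.List.pyRange 0 (PySem.List.len (PySem.Chars.lower word)) 1).foldl (fun answer index =>
        if (index == 0 || PySem.Int.mod index 2 == 0) = true
        then answer ++ [PySem.Chars.upperChar (PySem.List.pyGetD (PySem.Chars.lower word) index ' ')]
        else answer ++ [PySem.List.pyGetD (PySem.Chars.lower word) index ' ']) answer) ++ [' ']) acc
    = acc ++ (ws.map (fun w => procN 0 (PySem.Chars.lower w) ++ [' '])).flatten := by
  induction ws with
  | nil => intro acc; simp
  | cons w ws ih =>
    intro acc
    rw [List.foldl_cons, inner0, ih]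
    simp


-- ===== VERDICT (by name: the statement is the Claim_ definition above) =====
theorem solution_spec : Claim_equal_solution := by
  intro s _
  unfold Spec_solution
  have hA : solution s = String.ofList (bspec 0 s.toList) := by
    unfold solution
    simp only [splitOn_eq_mySplit, words_fold, main_lemma, PySem.List.slice_to_neg_one]
    simp [PySem.Chars.lower, procN]
  have hB : solution_alt s = String.ofList (bspec 0 s.toList) := by
    unfold solution_alt
    simp only [bfold]
    simp
  rw [hA, hB]
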